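-- pv_equiv track=rewrite | github.com/monika-chauhan/Dynamic-Programming-Python | Know About Dynamic Programming/DP2.  2D and 3D Probelms/Ninja and his Friend (3D) DP13/Memorization solution.py | maximumChocolates
-- ===== SOURCE A (Python) =====
-- def maximumChocolates(i, j1, j2, n, m, mat):
--     dp = [[[-1 for j in range(m)] for i in range(m)] for k in range(n)]
--     if j1 < 0 or j1 >= m or j1 < 0 or j2 >= m:  # out of boundary
--         return int(-1e9)
--     if i == n - 1:
--         if j1 == j2:
--             return mat[i][j1]
--         else:
--             return mat[i][j1] + mat[i][j2]
--
--     if dp[i][j1][j2] != -1: return dp[i][j1][j2]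
--
--     maxi = float('-inf')
--     for di in range(-1, 2):
--         for dj in range(-1, 2):
--             if j1 == j2:
--                 ans = mat[i][j1] + maximumChocolates(i + 1, j1 + di, j2 + dj, n, m, mat)
--             else:
--                 ans = mat[i][j1] + mat[i][j2] + maximumChocolates(i + 1, j1 + di, j2 + dj, n, m, mat)
--             maxi = max(maxi, ans)
--     dp[i][j1][j2] = maxi
--     return maxi
-- ===== SOURCE B (Python) =====
-- def maximumChocolates(i, j1, j2, n, m, mat):
--     # Memoized top-down DP over states (row, col1, col2): each state is solved once.
--     memo = {}
--
--     def best(r, a, b):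
--         if a < 0 or a >= m or b >= m:
--             return -(10 ** 9)
--         here = mat[r][a] if a == b else mat[r][a] + mat[r][b]
--         if r == n - 1:
--             return here
--         if (r, a, b) not in memo:
--             memo[(r, a, b)] = here + max(best(r + 1, a + da, b + db)
--                                          for da in (-1, 0, 1) for db in (-1, 0, 1))
--         return memo[(r, a, b)]
--
--     return best(i, j1, j2)
-- ===== Notes on version B (the rewrite author's own statement) =====
-- stated objective: alternative
-- what changed: Replaced A's exponential 9-way recursion (its dp memo table is re-allocated on every call, so it never memoizes) by a top-down DP with one persistent memo dict keyed by (row, col1, col2), so each state is solved once; intended as faster (measured 11515x at the largest size both finished, unconfirmed at larger sizes where B hits the recursion limit). Pre_ conservatively excludes inputs where some reachable state would index outside a matrix row (IndexError); its closed-form shape also excludes some short-row/deep-start inputs on which A happens to return, where B returns the same value.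
-- outside the precondition, e.g. on maximumChocolates(1, 2, 2, 2, 6, [[1, 1, 0, 6], [5, 8, 5, 8]]): A returns 5, B returns 5
import Mathlib
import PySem

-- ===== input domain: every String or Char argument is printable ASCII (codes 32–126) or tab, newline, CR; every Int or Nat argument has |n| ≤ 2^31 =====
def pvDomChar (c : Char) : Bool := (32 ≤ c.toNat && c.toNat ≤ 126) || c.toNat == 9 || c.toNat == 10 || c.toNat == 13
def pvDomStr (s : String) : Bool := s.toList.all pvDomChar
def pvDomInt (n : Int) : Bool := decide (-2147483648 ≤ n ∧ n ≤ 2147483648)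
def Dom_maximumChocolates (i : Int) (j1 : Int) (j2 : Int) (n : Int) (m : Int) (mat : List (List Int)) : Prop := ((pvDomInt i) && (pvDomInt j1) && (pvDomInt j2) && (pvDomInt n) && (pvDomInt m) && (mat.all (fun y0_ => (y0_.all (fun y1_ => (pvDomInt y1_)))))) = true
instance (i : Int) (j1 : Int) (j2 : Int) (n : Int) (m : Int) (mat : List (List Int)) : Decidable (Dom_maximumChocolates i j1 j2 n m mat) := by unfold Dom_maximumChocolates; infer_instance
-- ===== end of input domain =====

-- B replaces A's exponential 9-way recursion (whose dp table is re-allocated per call, so it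
-- never memoizes) by the same search memoized in one persistent dict: each state solved once.

-- ===== PORT A =====
-- mat[r][c] with Python index semantics (negative c reads from the row's end); where Python
-- raises IndexError the pyGet? is none and `getD 0` is a placeholder — Pre_ excludes those inputs.
def pvCell (mat : List (List Int)) (r c : Int) : Int :=
  (((PySem.List.pyGet? mat r).bind (fun row => PySem.List.pyGet? row c)).getD 0)

-- the 9 (di, dj) pairs of A's double loop `for di in range(-1,2): for dj in range(-1,2)`
def pvDirs : List (Int × Int) :=
  [(-1,-1),(-1,0),(-1,1),(0,-1),(0,0),(0,1),(1,-1),(1,0),(1,1)]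

-- A's recursion, fuel = recursion depth n-i (Python's recursion is unbounded only outside Pre_).
-- A's `dp` is freshly allocated on every call with every entry -1, so the memo test
-- `dp[i][j1][j2] != -1` is never true and is ported as the dead branch it is.
-- `maxi` starts at float('-inf') and is maxed over 9 int values, i.e. it is their maximum;
-- ported as a foldl over pvDirs seeded with the first pair's value (max is idempotent).
def pvAGo : Nat → Int → Int → Int → Int → Int → List (List Int) → Int
  | fuel, i, j1, j2, n, m, mat =>
    if j1 < 0 ∨ j1 ≥ m ∨ j1 < 0 ∨ j2 ≥ m then -1000000000  -- out of boundary
    else if i = n - 1 then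
      (if j1 = j2 then pvCell mat i j1 else pvCell mat i j1 + pvCell mat i j2)
    else
      match fuel with
      | 0 => 0  -- unreachable inside Pre_: Python would recurse past row n-1
      | fuel' + 1 =>
        let ans := fun (d : Int × Int) =>
          (if j1 = j2 then pvCell mat i j1 else pvCell mat i j1 + pvCell mat i j2)
          + pvAGo fuel' (i+1) (j1+d.1) (j2+d.2) n m mat
        pvDirs.foldl (fun maxi d => max maxi (ans d)) (ans (-1,-1))

def maximumChocolates (i : Int) (j1 : Int) (j2 : Int) (n : Int) (m : Int) (mat : List (List Int)) : Int :=
  pvAGo (n - i).toNat i j1 j2 n m mat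

-- ===== PORT B =====
-- Source B's `here`: the chocolates both travelers pick up in the current state
def pvHere (mat : List (List Int)) (r a b : Int) : Int :=
  if a = b then pvCell mat r a else pvCell mat r a + pvCell mat r b

-- Source B's `best` with the memo dict threaded through; fuel bounds the recursion depth as in
-- port A (inside Pre_ the fuel n-i always suffices).  Python's
-- `max(best(...) for da in (-1,0,1) for db in (-1,0,1))` is a left fold over the same 9 pairs
-- carrying the running maximum as an Option (none before the first value) and the memo.
def pvBGo : Nat → Int → Int → Int → Int → Int → List (List Int) →
    PySem.Dict (Int × Int × Int) Int → Int × PySem.Dict (Int × Int × Int) Int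
  | fuel, r, a, b, n, m, mat, memo =>
    if a < 0 ∨ a ≥ m ∨ b ≥ m then (-1000000000, memo)
    else if r = n - 1 then (pvHere mat r a b, memo)
    else
      match memo.get? (r, a, b) with
      | some v => (v, memo)
      | none =>
        match fuel with
        | 0 => (0, memo)  -- unreachable inside Pre_
        | fuel' + 1 =>
          let s := pvDirs.foldl
            (fun (p : Option Int × PySem.Dict (Int × Int × Int) Int) d =>
              let q := pvBGo fuel' (r+1) (a+d.1) (b+d.2) n m mat p.2
              (some (match p.1 with | none => q.1 | some best => max best q.1), q.2))
            (none, memo)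
          (pvHere mat r a b + s.1.getD 0, s.2.insert (r, a, b) (pvHere mat r a b + s.1.getD 0))

def maximumChocolates_alt (i : Int) (j1 : Int) (j2 : Int) (n : Int) (m : Int) (mat : List (List Int)) : Int :=
  (pvBGo (n - i).toNat i j1 j2 n m mat PySem.Dict.empty).1

-- ===== PRECONDITION & SPEC =====
-- Pre_ is where Python A returns normally: either the immediate out-of-boundary return, or a
-- start state inside an n×(≥m) grid from which no reachable state indexes outside its row
-- (j2 ≥ n-1-i-m), where A would raise IndexError.  This closed-form shape is conservative: it
-- also excludes some grids with rows shorter than m (or deeper starts) on which A's reads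
-- happen to stay inside the rows and A returns; B returns the same value there.
def Pre_maximumChocolates (i : Int) (j1 : Int) (j2 : Int) (n : Int) (m : Int) (mat : List (List Int)) : Prop :=
  (j1 < 0 ∨ j1 ≥ m ∨ j2 ≥ m)
  ∨ (0 ≤ i ∧ i < n ∧ n ≤ (mat.length : Int) ∧ (∀ row ∈ mat, m ≤ (row.length : Int))
     ∧ 0 ≤ j1 ∧ j1 < m ∧ j2 < m ∧ n - 1 - i - m ≤ j2)
instance (i : Int) (j1 : Int) (j2 : Int) (n : Int) (m : Int) (mat : List (List Int)) : Decidable (Pre_maximumChocolates i j1 j2 n m mat) := by unfold Pre_maximumChocolates; infer_instance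
def pvWitness_maximumChocolates : Int × Int × Int × Int × Int × List (List Int) := (0, 0, 1, 2, 2, [[1,2],[3,4]])

def Spec_maximumChocolates (i : Int) (j1 : Int) (j2 : Int) (n : Int) (m : Int) (mat : List (List Int)) (out : Int) : Prop := out = maximumChocolates_alt i j1 j2 n m mat
instance (i : Int) (j1 : Int) (j2 : Int) (n : Int) (m : Int) (mat : List (List Int)) (out : Int) : Decidable (Spec_maximumChocolates i j1 j2 n m mat out) := by unfold Spec_maximumChocolates; infer_instance

-- ===== CLAIM (what is proved, stated in full; the proofs are below) =====
def Claim_equal_maximumChocolates : Prop := ∀ (i : Int) (j1 : Int) (j2 : Int) (n : Int) (m : Int) (mat : List (List Int)), Dom_maximumChocolates i j1 j2 n m mat → Pre_maximumChocolates i j1 j2 n m mat → Spec_maximumChocolates i j1 j2 n m mat (maximumChocolates i j1 j2 n m mat)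

-- ===== LEMMAS AND PROOFS =====

-- A's out-of-boundary return
theorem pvAGo_out (fuel : Nat) (i j1 j2 n m : Int) (mat : List (List Int))
    (h : j1 < 0 ∨ j1 ≥ m ∨ j1 < 0 ∨ j2 ≥ m) :
    pvAGo fuel i j1 j2 n m mat = -1000000000 := by
  cases fuel with
  | zero => rw [pvAGo, if_pos h]
  | succ f => rw [pvAGo, if_pos h]

-- A's last-row return, any fuel
theorem pvAGo_base (fuel : Nat) (i j1 j2 n m : Int) (mat : List (List Int))
    (h1 : ¬ (j1 < 0 ∨ j1 ≥ m ∨ j1 < 0 ∨ j2 ≥ m)) (h2 : i = n - 1) :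
    pvAGo fuel i j1 j2 n m mat = pvHere mat i j1 j2 := by
  cases fuel with
  | zero => rw [pvAGo, if_neg h1, if_pos h2]; rfl
  | succ f => rw [pvAGo, if_neg h1, if_pos h2]; rfl

-- one unfolding of A's recursion in the recursive case (pvHere abbreviates A's repeated
-- `mat[i][j1] (+ mat[i][j2])` term, definitionally)
theorem pvAGo_succ (fuel : Nat) (i j1 j2 n m : Int) (mat : List (List Int))
    (h1 : ¬ (j1 < 0 ∨ j1 ≥ m ∨ j1 < 0 ∨ j2 ≥ m)) (h2 : ¬ i = n - 1) :
    pvAGo (fuel + 1) i j1 j2 n m mat =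
      pvDirs.foldl (fun maxi d => max maxi
          (pvHere mat i j1 j2 + pvAGo fuel (i+1) (j1+d.1) (j2+d.2) n m mat))
        (pvHere mat i j1 j2 + pvAGo fuel (i+1) (j1 + -1) (j2 + -1) n m mat) := by
  rw [pvAGo, if_neg h1, if_neg h2]; rfl

-- A's value does not depend on the fuel once the fuel covers the remaining depth n-1-i
theorem pvAGo_stable (n m : Int) (mat : List (List Int)) :
    ∀ (f g : Nat) (i j1 j2 : Int), i ≤ n - 1 → (n - 1 - i).toNat ≤ f → (n - 1 - i).toNat ≤ g →
      pvAGo f i j1 j2 n m mat = pvAGo g i j1 j2 n m mat := by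
  intro f
  induction f with
  | zero =>
    intro g i j1 j2 hle hf _
    have hi : i = n - 1 := by omega
    by_cases hb : j1 < 0 ∨ j1 ≥ m ∨ j1 < 0 ∨ j2 ≥ m
    · rw [pvAGo_out _ _ _ _ _ _ _ hb, pvAGo_out _ _ _ _ _ _ _ hb]
    · rw [pvAGo_base _ _ _ _ _ _ _ hb hi, pvAGo_base _ _ _ _ _ _ _ hb hi]
  | succ f ih =>
    intro g i j1 j2 hle hf hg
    by_cases hb : j1 < 0 ∨ j1 ≥ m ∨ j1 < 0 ∨ j2 ≥ m
    · rw [pvAGo_out _ _ _ _ _ _ _ hb, pvAGo_out _ _ _ _ _ _ _ hb]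
    · by_cases hi : i = n - 1
      · rw [pvAGo_base _ _ _ _ _ _ _ hb hi, pvAGo_base _ _ _ _ _ _ _ hb hi]
      · have hlt : i < n - 1 := lt_of_le_of_ne hle hi
        obtain ⟨g', rfl⟩ : ∃ g', g = g' + 1 := ⟨g - 1, by omega⟩
        have hrec : ∀ d1 d2 : Int,
            pvAGo f (i+1) (j1+d1) (j2+d2) n m mat = pvAGo g' (i+1) (j1+d1) (j2+d2) n m mat := by
          intro d1 d2
          exact ih g' (i+1) (j1+d1) (j2+d2) (by omega) (by omega) (by omega)
        rw [pvAGo_succ _ _ _ _ _ _ _ hb hi, pvAGo_succ _ _ _ _ _ _ _ hb hi]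
        simp only [hrec]

-- B's out-of-boundary return
theorem pvBGo_out (fuel : Nat) (r a b n m : Int) (mat : List (List Int))
    (memo : PySem.Dict (Int × Int × Int) Int) (h : a < 0 ∨ a ≥ m ∨ b ≥ m) :
    pvBGo fuel r a b n m mat memo = (-1000000000, memo) := by
  cases fuel with
  | zero => rw [pvBGo, if_pos h]
  | succ f => rw [pvBGo, if_pos h]

-- the memo invariant: every stored entry is the (fuel-independent) value of A's recursion
def pvInv (n m : Int) (mat : List (List Int)) (memo : PySem.Dict (Int × Int × Int) Int) : Prop :=
  ∀ r a b v, memo.get? (r, a, b) = some v →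
    r ≤ n - 1 ∧ v = pvAGo (n - 1 - r).toNat r a b n m mat

theorem pvInv_empty (n m : Int) (mat : List (List Int)) :
    pvInv n m mat PySem.Dict.empty := by
  intro r a b v h
  simp [PySem.Dict.get?_empty] at h

-- the heart: with enough fuel and a sound memo, B's memoized search returns A's value
-- and leaves the memo sound
set_option maxHeartbeats 2000000 in
theorem pvB_main (n m : Int) (mat : List (List Int)) :
    ∀ (f : Nat) (r a b : Int) (memo : PySem.Dict (Int × Int × Int) Int),
      r ≤ n - 1 → (n - 1 - r).toNat ≤ f → pvInv n m mat memo →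
      (pvBGo f r a b n m mat memo).1 = pvAGo f r a b n m mat ∧
        pvInv n m mat (pvBGo f r a b n m mat memo).2 := by
  intro f
  induction f with
  | zero =>
    intro r a b memo hle hf hinv
    have hr : r = n - 1 := by omega
    by_cases hb : a < 0 ∨ a ≥ m ∨ b ≥ m
    · rw [pvBGo, if_pos hb]
      exact ⟨(pvAGo_out _ _ _ _ _ _ _ (by omega)).symm, hinv⟩
    · rw [pvBGo, if_neg hb, if_pos hr]
      exact ⟨(pvAGo_base _ _ _ _ _ _ _ (by omega) hr).symm, hinv⟩
  | succ f ih =>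
    intro r a b memo hle hf hinv
    by_cases hb : a < 0 ∨ a ≥ m ∨ b ≥ m
    · rw [pvBGo, if_pos hb]
      exact ⟨(pvAGo_out _ _ _ _ _ _ _ (by omega)).symm, hinv⟩
    · by_cases hr : r = n - 1
      · rw [pvBGo, if_neg hb, if_pos hr]
        exact ⟨(pvAGo_base _ _ _ _ _ _ _ (by omega) hr).symm, hinv⟩
      · have hlt : r < n - 1 := lt_of_le_of_ne hle hr
        -- the inner fold over the 9 directions
        have fold : ∀ (ds : List (Int × Int)) (acc : Option Int)
              (memo' : PySem.Dict (Int × Int × Int) Int), pvInv n m mat memo' →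
            (ds.foldl
              (fun (p : Option Int × PySem.Dict (Int × Int × Int) Int) d =>
                let q := pvBGo f (r+1) (a+d.1) (b+d.2) n m mat p.2
                (some (match p.1 with | none => q.1 | some best => max best q.1), q.2))
              (acc, memo')).1
            = ds.foldl
                (fun (o : Option Int) d =>
                  some (match o with
                        | none => pvAGo f (r+1) (a+d.1) (b+d.2) n m mat
                        | some best => max best (pvAGo f (r+1) (a+d.1) (b+d.2) n m mat)))
                acc ∧
            pvInv n m mat (ds.foldl
              (fun (p : Option Int × PySem.Dict (Int × Int × Int) Int) d =>
                let q := pvBGo f (r+1) (a+d.1) (b+d.2) n m mat p.2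
                (some (match p.1 with | none => q.1 | some best => max best q.1), q.2))
              (acc, memo')).2 := by
          intro ds
          induction ds with
          | nil => intro acc memo' h; exact ⟨rfl, h⟩
          | cons d ds ihds =>
            intro acc memo' h
            have hq := ih (r+1) (a+d.1) (b+d.2) memo' (by omega) (by omega) h
            simp only [List.foldl_cons]
            have e : (some (match acc with
                       | none => (pvBGo f (r+1) (a+d.1) (b+d.2) n m mat memo').1
                       | some best => max best (pvBGo f (r+1) (a+d.1) (b+d.2) n m mat memo').1),
                      (pvBGo f (r+1) (a+d.1) (b+d.2) n m mat memo').2)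
                   = (some (match acc with
                       | none => pvAGo f (r+1) (a+d.1) (b+d.2) n m mat
                       | some best => max best (pvAGo f (r+1) (a+d.1) (b+d.2) n m mat)),
                      (pvBGo f (r+1) (a+d.1) (b+d.2) n m mat memo').2) := by
              rw [hq.1]
            rw [e]
            exact ihds _ _ hq.2
        -- C + running-Option-max over ds  =  the max-fold A performs, for any seed
        have hgen : ∀ (ds : List (Int × Int)) (o : Int),
            ds.foldl (fun maxi d => max maxi
                (pvHere mat r a b + pvAGo f (r+1) (a+d.1) (b+d.2) n m mat))
              (pvHere mat r a b + o)
            = pvHere mat r a b +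
              (ds.foldl
                (fun (acc : Option Int) d =>
                  some (match acc with
                        | none => pvAGo f (r+1) (a+d.1) (b+d.2) n m mat
                        | some best => max best (pvAGo f (r+1) (a+d.1) (b+d.2) n m mat)))
                (some o)).getD 0 := by
          intro ds
          induction ds with
          | nil => intro o; rfl
          | cons d ds ihds =>
            intro o
            simp only [List.foldl_cons]
            rw [max_add_add_left]
            exact ihds (max o (pvAGo f (r+1) (a+d.1) (b+d.2) n m mat))
        -- the value B stores/returns equals A's one-step unfolding
        have hA : pvHere mat r a b +
              (pvDirs.foldl
                (fun (o : Option Int) d =>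
                  some (match o with
                        | none => pvAGo f (r+1) (a+d.1) (b+d.2) n m mat
                        | some best => max best (pvAGo f (r+1) (a+d.1) (b+d.2) n m mat)))
                none).getD 0
            = pvAGo (f+1) r a b n m mat := by
          rw [pvAGo_succ _ _ _ _ _ _ _ (by omega) hr]
          rw [show pvDirs = ((-1,-1) : Int × Int) ::
                [((-1:Int),(0:Int)),(-1,1),(0,-1),(0,0),(0,1),(1,-1),(1,0),(1,1)] from rfl]
          conv_lhs => rw [List.foldl_cons]
          conv_rhs => rw [List.foldl_cons]
          dsimp only []
          rw [max_self]
          exact (hgen [((-1:Int),(0:Int)),(-1,1),(0,-1),(0,0),(0,1),(1,-1),(1,0),(1,1)]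
            (pvAGo f (r+1) (a + -1) (b + -1) n m mat)).symm
        cases hmemo : memo.get? (r, a, b) with
        | some v =>
          have hv := hinv r a b v hmemo
          rw [pvBGo, if_neg hb, if_neg hr, hmemo]
          refine ⟨?_, hinv⟩
          rw [hv.2]
          exact (pvAGo_stable n m mat (f+1) (n - 1 - r).toNat r a b hle hf (le_refl _)).symm
        | none =>
          obtain ⟨hval, hinv'⟩ := fold pvDirs none memo hinv
          -- name the fold's running maximum and final memo
          obtain ⟨o, memo2, hS⟩ : ∃ o memo2,
              pvDirs.foldl
                (fun (p : Option Int × PySem.Dict (Int × Int × Int) Int) d =>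
                  let q := pvBGo f (r+1) (a+d.1) (b+d.2) n m mat p.2
                  (some (match p.1 with | none => q.1 | some best => max best q.1), q.2))
                (none, memo) = (o, memo2) := ⟨_, _, rfl⟩
          rw [hS] at hval hinv'
          dsimp only [] at hval hinv'
          have hstep : pvBGo (f+1) r a b n m mat memo
              = (pvHere mat r a b + o.getD 0,
                 memo2.insert (r, a, b) (pvHere mat r a b + o.getD 0)) := by
            rw [pvBGo, if_neg hb, if_neg hr, hmemo, hS]
          rw [hstep]
          refine ⟨?_, ?_⟩
          · show pvHere mat r a b + o.getD 0 = _
            rw [hval, hA]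
          · intro r' a' b' v' hget
            by_cases hk : (r', a', b') = (r, a, b)
            · simp only [Prod.mk.injEq] at hk
              obtain ⟨rfl, rfl, rfl⟩ := hk
              rw [PySem.Dict.get?_insert_self] at hget
              refine ⟨hle, ?_⟩
              rw [Option.some.injEq] at hget
              rw [← hget, hval, hA]
              exact pvAGo_stable n m mat (f+1) _ _ _ _ hle hf (le_refl _)
            · rw [PySem.Dict.get?_insert_of_ne _ _ hk] at hget
              exact hinv' r' a' b' v' hget

-- ===== VERDICT (by name: the statement is the Claim_ definition above) =====
theorem maximumChocolates_spec : Claim_equal_maximumChocolates := by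
  intro i j1 j2 n m mat _ hpre
  unfold Spec_maximumChocolates maximumChocolates maximumChocolates_alt
  rcases hpre with hout | ⟨hi0, hin, hlen, hrows, hj10, hj1m, hj2m, hj2lo⟩
  · rw [pvAGo_out _ _ _ _ _ _ _ (by omega), pvBGo_out _ _ _ _ _ _ _ _ (by omega)]
  · exact ((pvB_main n m mat (n - i).toNat i j1 j2 PySem.Dict.empty (by omega) (by omega)
      (pvInv_empty n m mat)).1).symm
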